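-- pv_equiv track=rewrite | github.com/Xynovitch/Narrative-Causal-Graph | cekg_pipeline/optimized_linking.py | _entity_guided_pairs
-- ===== SOURCE A (Python) =====
-- from typing import List, Tuple, Dict, Set, Optional, Any
--
-- def _entity_guided_pairs(entity_occurrences: Dict, event_map: Dict) -> Set[Tuple]:
--     pairs = set()
--     for entity_key, occurrences in entity_occurrences.items():
--         if "place:" in entity_key: continue
--
--         # Link consecutive appearances
--         for i in range(len(occurrences) - 1):
--             c_id, _ = occurrences[i]
--             e_id, _ = occurrences[i + 1]
--             if c_id in event_map and e_id in event_map: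
--                 pairs.add((c_id, e_id))
--
--         # Main characters: check broader window
--         if len(occurrences) > 5:
--             for i in range(len(occurrences)):
--                 for j in range(i + 1, min(i + 5, len(occurrences))):
--                     c_id, _ = occurrences[i]
--                     e_id, _ = occurrences[j]
--                     if c_id in event_map and e_id in event_map:
--                         pairs.add((c_id, e_id))
--     return pairs
-- ===== SOURCE B (Python) =====
-- from typing import List, Tuple, Dict, Set, Optional, Any
--
-- def _entity_guided_pairs(entity_occurrences: Dict, event_map: Dict) -> Set[Tuple]:
--     # Different algorithm: per entity, index the linkable occurrences once as
--     # (position, id) "hits" (ids present in event_map), then scan that index: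
--     # adjacent pairs are consecutive hits at positional distance 1, and window
--     # pairs come from a bounded two-pointer sweep over the hits, so the
--     # membership test disappears from every pairing loop.
--     pairs = set()
--     for entity_key, occurrences in entity_occurrences.items():
--         if "place:" in entity_key:
--             continue
--         hits = [(p, c) for p, (c, _) in enumerate(occurrences) if c in event_map]
--         for k in range(len(hits) - 1):
--             if hits[k + 1][0] == hits[k][0] + 1:
--                 pairs.add((hits[k][1], hits[k + 1][1]))
--         if len(occurrences) > 5:
--             for k in range(len(hits)):
--                 m = k + 1
--                 while m < len(hits) and hits[m][0] <= hits[k][0] + 4: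
--                     pairs.add((hits[k][1], hits[m][1]))
--                     m += 1
--     return pairs
-- ===== Notes on version B (the rewrite author's own statement) =====
-- stated objective: alternative
-- what changed: Instead of testing event_map membership inside every pairing loop over raw occurrence indices, B first builds per entity a filtered (position, id) hit index of the occurrences whose id is in event_map, then derives adjacent pairs as consecutive hits at positional distance 1 and window pairs by a bounded two-pointer sweep over the hits, so the membership test disappears from all pairing loops.
import Mathlib
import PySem

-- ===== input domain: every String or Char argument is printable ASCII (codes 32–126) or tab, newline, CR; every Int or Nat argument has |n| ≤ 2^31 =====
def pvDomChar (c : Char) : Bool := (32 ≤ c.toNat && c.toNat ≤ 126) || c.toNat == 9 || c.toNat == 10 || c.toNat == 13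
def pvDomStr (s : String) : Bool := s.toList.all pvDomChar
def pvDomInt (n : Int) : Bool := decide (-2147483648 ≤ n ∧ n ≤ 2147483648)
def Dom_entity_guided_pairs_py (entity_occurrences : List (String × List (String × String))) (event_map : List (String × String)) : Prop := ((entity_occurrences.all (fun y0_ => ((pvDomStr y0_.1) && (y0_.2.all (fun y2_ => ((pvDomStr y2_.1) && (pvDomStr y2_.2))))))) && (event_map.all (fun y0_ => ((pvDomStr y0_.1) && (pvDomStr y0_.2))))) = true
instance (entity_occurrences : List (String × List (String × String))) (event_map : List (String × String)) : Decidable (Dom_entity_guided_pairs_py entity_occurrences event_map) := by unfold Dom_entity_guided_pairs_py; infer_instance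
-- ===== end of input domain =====

-- B replaces A's membership-tested index loops by a per-entity filtered (position, id)
-- hit index: adjacent pairs are consecutive hits at positional distance 1 and window
-- pairs come from a bounded two-pointer sweep over the hits — alternative algorithm, same result.

-- ===== PORT A =====
def entity_guided_pairs_py (entity_occurrences : List (String × List (String × String))) (event_map : List (String × String)) : List (String × String) :=
  let emd : PySem.Dict String String := PySem.Dict.ofList event_map
  ((PySem.Dict.ofList entity_occurrences).items).foldl (fun pairs kv =>
    if PySem.Str.isIn "place:" kv.1 then pairs
    else
      let occurrences := kv.2
      -- link consecutive appearances
      let pairs1 := (PySem.List.pyRange 0 ((occurrences.length : Int) - 1) 1).foldl (fun pairs i =>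
        let c_id := (PySem.List.pyGetD occurrences i ("", "")).1
        let e_id := (PySem.List.pyGetD occurrences (i + 1) ("", "")).1
        if emd.contains c_id && emd.contains e_id then PySem.Set.add pairs (c_id, e_id) else pairs) pairs
      -- main characters: broader window
      if (occurrences.length : Int) > 5 then
        (PySem.List.pyRange 0 (occurrences.length : Int) 1).foldl (fun pairs i =>
          (PySem.List.pyRange (i + 1) (min (i + 5) (occurrences.length : Int)) 1).foldl (fun pairs j =>
            let c_id := (PySem.List.pyGetD occurrences i ("", "")).1
            let e_id := (PySem.List.pyGetD occurrences j ("", "")).1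
            if emd.contains c_id && emd.contains e_id then PySem.Set.add pairs (c_id, e_id) else pairs) pairs) pairs1
      else pairs1) PySem.Set.empty

-- ===== PORT B =====
-- the inner 'while m < len(hits) and hits[m][0] <= hits[k][0] + 4' loop of Source B
def pvWhileB (hits : List (Int × String)) (limit : Int) (c : String) (m : Nat)
    (pairs : PySem.Set (String × String)) : PySem.Set (String × String) :=
  if h : m < hits.length ∧ (PySem.List.pyGetD hits (m : Int) (0, "")).1 ≤ limit then
    pvWhileB hits limit c (m + 1) (PySem.Set.add pairs (c, (PySem.List.pyGetD hits (m : Int) (0, "")).2))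
  else pairs
termination_by hits.length - m
decreasing_by omega

def entity_guided_pairs_py_alt (entity_occurrences : List (String × List (String × String))) (event_map : List (String × String)) : List (String × String) :=
  let emd : PySem.Dict String String := PySem.Dict.ofList event_map
  ((PySem.Dict.ofList entity_occurrences).items).foldl (fun pairs kv =>
    if PySem.Str.isIn "place:" kv.1 then pairs
    else
      let occurrences := kv.2
      -- hits = [(p, c) for p, (c, _) in enumerate(occurrences) if c in event_map]
      let hits : List (Int × String) :=
        ((PySem.List.enumerate occurrences).filter (fun pe => emd.contains pe.2.1)).map
          (fun pe => (pe.1, pe.2.1))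
      -- adjacent occurrences = consecutive hits at positional distance 1
      let pairs1 := (PySem.List.pyRange 0 ((hits.length : Int) - 1) 1).foldl (fun pairs k =>
        let a := PySem.List.pyGetD hits k (0, "")
        let b := PySem.List.pyGetD hits (k + 1) (0, "")
        if b.1 == a.1 + 1 then PySem.Set.add pairs (a.2, b.2) else pairs) pairs
      if (occurrences.length : Int) > 5 then
        (PySem.List.pyRange 0 (hits.length : Int) 1).foldl (fun pairs k =>
          let a := PySem.List.pyGetD hits k (0, "")
          pvWhileB hits (a.1 + 4) a.2 (k.toNat + 1) pairs) pairs1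
      else pairs1) PySem.Set.empty

-- ===== PRECONDITION & SPEC =====
def Spec_entity_guided_pairs_py (entity_occurrences : List (String × List (String × String))) (event_map : List (String × String)) (out : List (String × String)) : Prop := out = entity_guided_pairs_py_alt entity_occurrences event_map
instance (entity_occurrences : List (String × List (String × String))) (event_map : List (String × String)) (out : List (String × String)) : Decidable (Spec_entity_guided_pairs_py entity_occurrences event_map out) := by unfold Spec_entity_guided_pairs_py; infer_instance

-- ===== CLAIM (what is proved, stated in full; the proofs are below) =====
def Claim_equal_entity_guided_pairs_py : Prop := ∀ (entity_occurrences : List (String × List (String × String))) (event_map : List (String × String)), Dom_entity_guided_pairs_py entity_occurrences event_map → Spec_entity_guided_pairs_py entity_occurrences event_map (entity_guided_pairs_py entity_occurrences event_map)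

-- ===== LEMMAS AND PROOFS =====

-- hit index of an id list starting at position k (spec-level view of Source B's comprehension)
def pvHits (P : String → Bool) (k : Int) : List String → List (Int × String)
  | [] => []
  | x :: t => if P x then (k, x) :: pvHits P (k + 1) t else pvHits P (k + 1) t

-- pair list emitted by A's consecutive pass (values actually added, in order)
def pvEA (P : String → Bool) : List String → List (String × String)
  | x :: y :: t => (if P x && P y then [(x, y)] else []) ++ pvEA P (y :: t)
  | _ => []

-- pair list emitted by A's window pass (values actually added, in order)
def pvEW (P : String → Bool) : List String → List (String × String)
  | [] => []
  | x :: t => (if P x then ((t.take 4).filter P).map (fun y => (x, y)) else []) ++ pvEW P t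

-- pair list emitted by B's adjacency scan over the hits
def pvG : List (Int × String) → List (String × String)
  | a :: b :: t => (if b.1 == a.1 + 1 then [(a.2, b.2)] else []) ++ pvG (b :: t)
  | _ => []

-- pair list emitted by B's two-pointer sweep over the hits
def pvWL : List (Int × String) → List (String × String)
  | [] => []
  | h :: rest => (rest.takeWhile (fun b => decide (b.1 ≤ h.1 + 4))).map (fun b => (h.2, b.2)) ++ pvWL rest

theorem pvHits_eq (P : String → Bool) (l : List (String × String)) : ∀ (k : Int),
    ((PySem.List.enumerate l k).filter (fun pe => P pe.2.1)).map (fun pe => (pe.1, pe.2.1))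
      = pvHits P k (l.map Prod.fst) := by
  induction l with
  | nil => intro k; simp [pvHits, PySem.List.enumerate_nil]
  | cons x t ih =>
    intro k
    rw [PySem.List.enumerate_cons]
    by_cases h : P x.1
    · simp [h, pvHits, ih]
    · simp [h, pvHits, ih]

theorem pvHits_pos_le (P : String → Bool) : ∀ (s : List String) (k : Int) (b : Int × String),
    b ∈ pvHits P k s → k ≤ b.1 := by
  intro s
  induction s with
  | nil => intro k b hb; simp [pvHits] at hb
  | cons x t ih =>
    intro k b hb
    by_cases h : P x
    · simp [pvHits, h] at hb
      rcases hb with hb | hb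
      · subst hb; simp
      · have := ih (k + 1) b hb; omega
    · simp [pvHits, h] at hb
      have := ih (k + 1) b hb; omega

theorem pvHits_map_snd (P : String → Bool) : ∀ (s : List String) (k : Int),
    (pvHits P k s).map Prod.snd = s.filter P := by
  intro s
  induction s with
  | nil => intro k; simp [pvHits]
  | cons x t ih =>
    intro k
    by_cases h : P x <;> simp [pvHits, h, ih]

-- indexing the projected id list = projecting the indexed pair
theorem pyGetD_fst (l : List (String × String)) (i : Int) :
    PySem.List.pyGetD (l.map Prod.fst) i "" = (PySem.List.pyGetD l i ("", "")).1 :=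
  PySem.List.pyGetD_map Prod.fst l i ("", "")

-- the consecutive-index comprehension over a list IS zip of the list with its tail
theorem consec_map_eq {α : Type} (l : List α) (d : α) :
    (PySem.List.pyRange 0 ((l.length : Int) - 1) 1).map
        (fun i => (PySem.List.pyGetD l i d, PySem.List.pyGetD l (i + 1) d))
      = l.zip l.tail := by
  apply List.ext_getElem
  · simp [PySem.List.length_pyRange_one]
  · intro k h1 h2
    have hk : k < l.length - 1 := by
      simpa [PySem.List.length_pyRange_one] using h1
    have e2 : PySem.List.pyGetD l ((k : Int) + 1) d = l[k + 1] := by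
      have h' : ((k : Int) + 1) = ((k + 1 : Nat) : Int) := by push_cast; ring
      rw [h', PySem.List.pyGetD_eq_getElem l d (by positivity)
            (by exact_mod_cast (by omega : k + 1 < l.length))]
      simp
    have e1 : l[k]? = some l[k] := List.getElem?_eq_getElem (by omega)
    simp [PySem.List.getElem_pyRange_one, e1, e2, List.getElem_zip, List.getElem_tail]

-- e.g. '[f(j) for j in range(a, b)]' indexes a contiguous drop/take block when b ≤ len
theorem map_pyGetD_range {α : Type} (xs : List α) (d : α) (a b : Nat) (hb : b ≤ xs.length) :
    (PySem.List.pyRange (a : Int) (b : Int) 1).map (fun j => PySem.List.pyGetD xs (j : Int) d)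
      = (xs.drop a).take (b - a) := by
  apply List.ext_getElem
  · simp [PySem.List.length_pyRange_one]; omega
  · intro k h1 h2
    have hk : k < b - a := by
      simpa [PySem.List.length_pyRange_one] using h1
    have hcast : ((a : Int) + (k : Int)) = ((a + k : Nat) : Int) := by push_cast; ring
    simp only [List.getElem_map, PySem.List.getElem_pyRange_one, hcast,
      PySem.List.pyGetD_natCast]
    rw [List.getD_eq_getElem _ _ (by omega : a + k < xs.length)]
    rw [List.getElem_take, List.getElem_drop]

theorem zip_filter_eq_pvEA (P : String → Bool) : ∀ (ids : List String),
    (ids.zip ids.tail).filter (fun p => P p.1 && P p.2) = pvEA P ids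
  | [] => by simp [pvEA]
  | [x] => by simp [pvEA]
  | x :: y :: t => by
    have ih := zip_filter_eq_pvEA P (y :: t)
    by_cases h : P x && P y <;>
      simp only [List.tail_cons, List.zip_cons_cons, List.filter_cons, h, pvEA] <;>
      simp only [List.tail_cons] at ih <;> simp [ih]

theorem zip_filter_eq_pvG : ∀ (hits : List (Int × String)),
    ((hits.zip hits.tail).filter (fun p => p.2.1 == p.1.1 + 1)).map (fun p => (p.1.2, p.2.2))
      = pvG hits
  | [] => by simp [pvG]
  | [a] => by simp [pvG]
  | a :: b :: t => by
    have ih := zip_filter_eq_pvG (b :: t)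
    by_cases h : b.1 == a.1 + 1 <;>
      simp only [List.tail_cons, List.zip_cons_cons, List.filter_cons, h, pvG] <;>
      simp only [List.tail_cons] at ih <;> simp [ih]

theorem map_pair_pyGetD_range (xs : List String) (d : String) (c : String) (a b : Nat)
    (hb : b ≤ xs.length) :
    (PySem.List.pyRange (a : Int) (b : Int) 1).map (fun j => (c, PySem.List.pyGetD xs (j : Int) d))
      = ((xs.drop a).take (b - a)).map (fun y => (c, y)) := by
  have h := congrArg (List.map (fun y => (c, y))) (map_pyGetD_range xs d a b hb)
  simpa [List.map_map, Function.comp] using h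

theorem winA_eq (P : String → Bool) : ∀ (ids : List String),
    (PySem.List.pyRange 0 (ids.length : Int) 1).flatMap (fun i =>
        ((PySem.List.pyRange (i + 1) (min (i + 5) (ids.length : Int)) 1).map (fun j =>
          (PySem.List.pyGetD ids i "", PySem.List.pyGetD ids j ""))).filter
            (fun p => P p.1 && P p.2))
      = pvEW P ids
  | [] => by simp [pvEW, PySem.List.pyRange_one_eq_nil]
  | x :: t => by
    have ih := winA_eq P t
    rw [show (((x :: t).length : Int)) = (t.length : Int) + 1 from by
      push_cast [List.length_cons]; ring]
    rw [PySem.List.pyRange_one_cons (by positivity), List.flatMap_cons]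
    -- first chunk: i = 0 pairs x with the next four ids
    rw [PySem.List.pyGetD_zero_cons]
    rw [show ((0 : Int) + 1) = 1 from by ring, show ((0 : Int) + 5) = 5 from by ring]
    rw [show min (5 : Int) ((t.length : Int) + 1) = ((min 5 (t.length + 1) : Nat) : Int) from by
      push_cast; omega]
    rw [show (PySem.List.pyRange 1 ((min 5 (t.length + 1) : Nat) : Int) 1).map
          (fun j => (x, PySem.List.pyGetD (x :: t) j ""))
        = (PySem.List.pyRange (((1 : Nat)) : Int) ((min 5 (t.length + 1) : Nat) : Int) 1).map
          (fun j => (x, PySem.List.pyGetD (x :: t) j "")) from by norm_num]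
    rw [map_pair_pyGetD_range (x :: t) "" x 1 (min 5 (t.length + 1)) (by simp)]
    rw [show List.drop 1 (x :: t) = t from rfl]
    rw [show min 5 (t.length + 1) - 1 = min 4 t.length from by omega]
    rw [← List.take_eq_take_min, List.filter_map]
    -- shifted tail: positions 1.. over x :: t are positions 0.. over t
    have hshift : (PySem.List.pyRange 1 ((t.length : Int) + 1) 1).flatMap (fun i =>
          ((PySem.List.pyRange (i + 1) (min (i + 5) ((t.length : Int) + 1)) 1).map (fun j =>
            (PySem.List.pyGetD (x :: t) i "", PySem.List.pyGetD (x :: t) j ""))).filter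
              (fun p => P p.1 && P p.2))
        = (PySem.List.pyRange 0 (t.length : Int) 1).flatMap (fun i =>
            ((PySem.List.pyRange (i + 1) (min (i + 5) (t.length : Int)) 1).map (fun j =>
              (PySem.List.pyGetD t i "", PySem.List.pyGetD t j ""))).filter
                (fun p => P p.1 && P p.2)) := by
      rw [PySem.List.pyRange_one 1 ((t.length : Int) + 1), PySem.List.pyRange_one 0]
      rw [show ((t.length : Int) + 1 - 1) = (t.length : Int) from by ring,
        show ((t.length : Int) - 0) = (t.length : Int) from by ring, Int.toNat_natCast]
      rw [List.flatMap_map, List.flatMap_map]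
      congr 1
      funext k
      have hg : PySem.List.pyGetD (x :: t) ((1 : Int) + (k : Int)) ""
          = PySem.List.pyGetD t ((0 : Int) + (k : Int)) "" := by
        rw [show ((1 : Int) + (k : Int)) = ((k + 1 : Nat) : Int) from by push_cast; ring,
          show ((0 : Int) + (k : Int)) = ((k : Nat) : Int) from by norm_num]
        rw [PySem.List.pyGetD_natCast, PySem.List.pyGetD_natCast, List.getD_cons_succ]
      rw [hg]
      rw [show (((1 : Int) + (k : Int)) + 1) = ((k + 2 : Nat) : Int) from by push_cast; ring]
      rw [show min (((1 : Int) + (k : Int)) + 5) ((t.length : Int) + 1)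
            = ((min (k + 6) (t.length + 1) : Nat) : Int) from by push_cast; omega]
      rw [show (((0 : Int) + (k : Int)) + 1) = ((k + 1 : Nat) : Int) from by push_cast; ring]
      rw [show min (((0 : Int) + (k : Int)) + 5) ((t.length : Int))
            = ((min (k + 5) t.length : Nat) : Int) from by push_cast; omega]
      rw [map_pair_pyGetD_range (x :: t) "" _ (k + 2) (min (k + 6) (t.length + 1))
            (by simp)]
      rw [map_pair_pyGetD_range t "" _ (k + 1) (min (k + 5) t.length) (by omega)]
      rw [List.drop_succ_cons]
      rw [show min (k + 6) (t.length + 1) - (k + 2) = min (k + 5) t.length - (k + 1) from by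
        omega]
    rw [hshift, ih]
    by_cases hx : P x <;> simp [pvEW, hx, Function.comp_def]

theorem pvG_cons_of_head (h : List (Int × String)) (a : Int) (s : String)
    (hh : ∀ b, h.head? = some b → ¬ b.1 = a + 1) : pvG ((a, s) :: h) = pvG h := by
  cases h with
  | nil => simp [pvG]
  | cons b t =>
    have hb : (b.1 == a + 1) = false := by
      simpa using hh b rfl
    simp [pvG, hb]

theorem pvEA_cons_neg (P : String → Bool) (x : String) (t : List String) (h : P x = false) :
    pvEA P (x :: t) = pvEA P t := by
  cases t <;> simp [pvEA, h]

-- combined invariant: B's adjacency scan over the hits emits exactly A's consecutive pairs,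
-- also when a pending left hit at position k - 1 is prepended
theorem pvG_hits_all (P : String → Bool) : ∀ (ids : List String) (k : Int),
    (pvG (pvHits P k ids) = pvEA P ids) ∧
    (∀ s, P s = true → pvG ((k - 1, s) :: pvHits P k ids) = pvEA P (s :: ids)) := by
  intro ids
  induction ids with
  | nil =>
    intro k
    constructor
    · simp [pvHits, pvG, pvEA]
    · intro s _; simp [pvHits, pvG, pvEA]
  | cons x t ih =>
    intro k
    obtain ⟨ihm, iha⟩ := ih (k + 1)
    by_cases h : P x
    · have ha := iha x h
      rw [show (k : Int) + 1 - 1 = k from by ring] at ha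
      constructor
      · rw [show pvHits P k (x :: t) = (k, x) :: pvHits P (k + 1) t from by simp [pvHits, h]]
        exact ha
      · intro s hs
        rw [show pvHits P k (x :: t) = (k, x) :: pvHits P (k + 1) t from by simp [pvHits, h]]
        rw [show pvG ((k - 1, s) :: (k, x) :: pvHits P (k + 1) t)
              = (s, x) :: pvG ((k, x) :: pvHits P (k + 1) t) from by
          simp [pvG, show (k - 1 + 1 : Int) = k from by ring]]
        rw [ha]
        simp [pvEA, hs, h]
    · have hf : P x = false := by simpa using h
      constructor
      · rw [show pvHits P k (x :: t) = pvHits P (k + 1) t from by simp [pvHits, h]]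
        rw [ihm, pvEA_cons_neg P x t hf]
      · intro s hs
        rw [show pvHits P k (x :: t) = pvHits P (k + 1) t from by simp [pvHits, h]]
        rw [pvG_cons_of_head _ _ _ (fun b hb => by
          have hm : b ∈ pvHits P (k + 1) t := List.mem_of_mem_head? hb
          have := pvHits_pos_le P t (k + 1) b hm
          omega)]
        rw [ihm]
        have h2 : pvEA P (s :: x :: t) = pvEA P (x :: t) := by simp [pvEA, hf]
        rw [h2, pvEA_cons_neg P x t hf]

theorem pvG_hits (P : String → Bool) : ∀ (ids : List String) (k : Int),
    pvG (pvHits P k ids) = pvEA P ids :=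
  fun ids k => (pvG_hits_all P ids k).1

theorem takeWhile_hits (P : String → Bool) : ∀ (t : List String) (k : Int) (d : Nat),
    (pvHits P k t).takeWhile (fun b => decide (b.1 < k + d)) = pvHits P k (t.take d) := by
  intro t
  induction t with
  | nil => intro k d; simp [pvHits]
  | cons x t ih =>
    intro k d
    by_cases h : P x
    · cases d with
      | zero =>
        rw [show pvHits P k (x :: t) = (k, x) :: pvHits P (k + 1) t from by simp [pvHits, h]]
        simp [pvHits]
      | succ d =>
        rw [show pvHits P k (x :: t) = (k, x) :: pvHits P (k + 1) t from by simp [pvHits, h]]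
        rw [List.takeWhile_cons]
        have hp : decide (((k : Int), x).1 < k + ((d + 1 : Nat) : Int)) = true := by
          simp
        rw [hp]
        simp only [if_true]
        have hfun : (fun (b : Int × String) => decide (b.1 < k + ((d + 1 : Nat) : Int)))
            = (fun (b : Int × String) => decide (b.1 < (k + 1) + ((d : Nat) : Int))) := by
          funext b; rw [decide_eq_decide]; push_cast; omega
        rw [hfun, ih (k + 1) d]
        simp [pvHits, h, List.take_succ_cons]
    · have hf : P x = false := by simpa using h
      rw [show pvHits P k (x :: t) = pvHits P (k + 1) t from by simp [pvHits, h]]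
      cases d with
      | zero =>
        cases hE : pvHits P (k + 1) t with
        | nil => simp [pvHits]
        | cons b r =>
          have hb : (k : Int) + 1 ≤ b.1 :=
            pvHits_pos_le P t (k + 1) b (hE ▸ List.mem_cons_self ..)
          rw [List.takeWhile_cons]
          have hp : decide (b.1 < k + ((0 : Nat) : Int)) = false := by
            simp; omega
          rw [hp]
          simp [pvHits]
      | succ d =>
        have hfun : (fun (b : Int × String) => decide (b.1 < k + ((d + 1 : Nat) : Int)))
            = (fun (b : Int × String) => decide (b.1 < (k + 1) + ((d : Nat) : Int))) := by
          funext b; rw [decide_eq_decide]; push_cast; omega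
        rw [hfun, ih (k + 1) d]
        simp [pvHits, hf, List.take_succ_cons]

theorem pvWL_hits (P : String → Bool) : ∀ (ids : List String) (k : Int),
    pvWL (pvHits P k ids) = pvEW P ids := by
  intro ids
  induction ids with
  | nil => intro k; simp [pvHits, pvWL, pvEW]
  | cons x t ih =>
    intro k
    by_cases h : P x
    · rw [show pvHits P k (x :: t) = (k, x) :: pvHits P (k + 1) t from by simp [pvHits, h]]
      rw [show pvWL (((k : Int), x) :: pvHits P (k + 1) t)
            = ((pvHits P (k + 1) t).takeWhile (fun b => decide (b.1 ≤ (k : Int) + 4))).map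
                (fun b => (x, b.2)) ++ pvWL (pvHits P (k + 1) t) from rfl]
      have hfun : (fun (b : Int × String) => decide (b.1 ≤ (k : Int) + 4))
          = (fun (b : Int × String) => decide (b.1 < (k + 1) + ((4 : Nat) : Int))) := by
        funext b; rw [decide_eq_decide]; push_cast; omega
      rw [hfun, takeWhile_hits P t (k + 1) 4]
      have hmap : (pvHits P (k + 1) (t.take 4)).map (fun b => (x, b.2))
          = ((t.take 4).filter P).map (fun y => (x, y)) := by
        rw [← pvHits_map_snd P (t.take 4) (k + 1), List.map_map]
        rfl
      rw [hmap, ih (k + 1)]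
      simp [pvEW, h]
    · rw [show pvHits P k (x :: t) = pvHits P (k + 1) t from by simp [pvHits, h]]
      rw [ih (k + 1)]
      simp [pvEW, h]

theorem pvWhileB_eq : ∀ (hits : List (Int × String)) (limit : Int) (c : String) (m : Nat)
    (s : PySem.Set (String × String)),
    pvWhileB hits limit c m s
      = (((hits.drop m).takeWhile (fun b => decide (b.1 ≤ limit))).map
          (fun b => (c, b.2))).foldl PySem.Set.add s
  | hits, limit, c, m, s => by
    rw [pvWhileB]
    split
    case isTrue h =>
      have hget : PySem.List.pyGetD hits (m : Int) ((0 : Int), "") = hits[m] := by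
        rw [PySem.List.pyGetD_natCast, List.getD_eq_getElem _ _ h.1]
      have hd : hits.drop m = hits[m] :: hits.drop (m + 1) := List.drop_eq_getElem_cons h.1
      have hp : decide (hits[m].1 ≤ limit) = true := by
        rw [decide_eq_true_eq]; rw [hget] at h; exact h.2
      rw [pvWhileB_eq hits limit c (m + 1) _, hd, List.takeWhile_cons, hp]
      simp only [if_true, List.map_cons, List.foldl_cons, hget]
    case isFalse h =>
      by_cases hm : m < hits.length
      · have hget : PySem.List.pyGetD hits (m : Int) ((0 : Int), "") = hits[m] := by
          rw [PySem.List.pyGetD_natCast, List.getD_eq_getElem _ _ hm]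
        have hd : hits.drop m = hits[m] :: hits.drop (m + 1) := List.drop_eq_getElem_cons hm
        have hp : decide (hits[m].1 ≤ limit) = false := by
          rw [decide_eq_false_iff_not]
          intro hle
          exact h ⟨hm, by rw [hget]; exact hle⟩
        rw [hd, List.takeWhile_cons, hp]
        simp
      · rw [List.drop_of_length_le (by omega)]
        simp
termination_by hits _ _ m _ => hits.length - m
decreasing_by omega

theorem winB_eq : ∀ (hits : List (Int × String)) (s : PySem.Set (String × String)),
    (PySem.List.pyRange 0 (hits.length : Int) 1).foldl (fun s k =>
        pvWhileB hits ((PySem.List.pyGetD hits k (0, "")).1 + 4)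
          (PySem.List.pyGetD hits k (0, "")).2 (k.toNat + 1) s) s
      = (pvWL hits).foldl PySem.Set.add s
  | [], s => by simp [pvWL, PySem.List.pyRange_one_eq_nil]
  | h :: rest, s => by
    rw [show (((h :: rest).length : Int)) = (rest.length : Int) + 1 from by
      push_cast [List.length_cons]; ring]
    rw [PySem.List.pyRange_one_cons (by positivity), List.foldl_cons]
    rw [PySem.List.pyGetD_zero_cons, pvWhileB_eq]
    rw [show ((0 : Int).toNat + 1) = 1 from by simp, List.drop_one, List.tail_cons]
    -- remaining fold over range 1..n+1 on (h :: rest) = fold over range 0..n on rest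
    have hshift : ∀ (s1 : PySem.Set (String × String)),
        (PySem.List.pyRange 1 ((rest.length : Int) + 1) 1).foldl (fun s k =>
            pvWhileB (h :: rest) ((PySem.List.pyGetD (h :: rest) k ((0 : Int), "")).1 + 4)
              (PySem.List.pyGetD (h :: rest) k ((0 : Int), "")).2 (k.toNat + 1) s) s1
          = (PySem.List.pyRange 0 (rest.length : Int) 1).foldl (fun s k =>
              pvWhileB rest ((PySem.List.pyGetD rest k ((0 : Int), "")).1 + 4)
                (PySem.List.pyGetD rest k ((0 : Int), "")).2 (k.toNat + 1) s) s1 := by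
      intro s1
      rw [PySem.List.pyRange_one 1 ((rest.length : Int) + 1), PySem.List.pyRange_one 0]
      rw [show ((rest.length : Int) + 1 - 1) = (rest.length : Int) from by ring,
        show ((rest.length : Int) - 0) = (rest.length : Int) from by ring, Int.toNat_natCast]
      rw [List.foldl_map, List.foldl_map]
      apply PySem.List.foldl_congr_mem
      intro acc k _
      have hg : PySem.List.pyGetD (h :: rest) ((1 : Int) + (k : Int)) ((0 : Int), "")
          = PySem.List.pyGetD rest ((0 : Int) + (k : Int)) ((0 : Int), "") := by
        rw [show ((1 : Int) + (k : Int)) = ((k + 1 : Nat) : Int) from by push_cast; ring,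
          show ((0 : Int) + (k : Int)) = ((k : Nat) : Int) from by norm_num]
        rw [PySem.List.pyGetD_natCast, PySem.List.pyGetD_natCast, List.getD_cons_succ]
      rw [hg]
      rw [show ((1 : Int) + (k : Int)).toNat + 1 = (((0 : Int) + (k : Int)).toNat + 1) + 1 from by omega]
      rw [pvWhileB_eq, pvWhileB_eq]
      rw [show (h :: rest).drop ((((0 : Int) + (k : Int)).toNat + 1) + 1)
            = rest.drop (((0 : Int) + (k : Int)).toNat + 1) from List.drop_succ_cons ..]
    rw [show (PySem.List.pyRange ((0 : Int) + 1) ((rest.length : Int) + 1) 1)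
          = PySem.List.pyRange 1 ((rest.length : Int) + 1) 1 from by norm_num]
    rw [hshift, winB_eq rest]
    rw [show pvWL (h :: rest)
          = (rest.takeWhile (fun b => decide (b.1 ≤ h.1 + 4))).map (fun b => (h.2, b.2))
            ++ pvWL rest from rfl]
    rw [List.foldl_append]

-- A's consecutive pass = fold of Set.add over its emitted pair list
theorem consA_fold (P : String → Bool) (ids : List String) (s : PySem.Set (String × String)) :
    (PySem.List.pyRange 0 ((ids.length : Int) - 1) 1).foldl (fun pairs i =>
      if P (PySem.List.pyGetD ids i "") && P (PySem.List.pyGetD ids (i + 1) "") then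
        PySem.Set.add pairs (PySem.List.pyGetD ids i "", PySem.List.pyGetD ids (i + 1) "")
      else pairs) s
    = (pvEA P ids).foldl PySem.Set.add s := by
  trans ((PySem.List.pyRange 0 ((ids.length : Int) - 1) 1).map (fun i =>
      (PySem.List.pyGetD ids i "", PySem.List.pyGetD ids (i + 1) ""))).foldl
      (fun pairs p => if P p.1 && P p.2 then PySem.Set.add pairs p else pairs) s
  · rw [List.foldl_map]
  · rw [consec_map_eq ids "", PySem.List.foldl_if_eq_foldl_filter, zip_filter_eq_pvEA]

-- B's adjacency scan = fold of Set.add over its emitted pair list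
theorem consB_fold (hits : List (Int × String)) (s : PySem.Set (String × String)) :
    (PySem.List.pyRange 0 ((hits.length : Int) - 1) 1).foldl (fun pairs k =>
      if (PySem.List.pyGetD hits (k + 1) ((0 : Int), "")).1
            == (PySem.List.pyGetD hits k ((0 : Int), "")).1 + 1 then
        PySem.Set.add pairs ((PySem.List.pyGetD hits k ((0 : Int), "")).2,
          (PySem.List.pyGetD hits (k + 1) ((0 : Int), "")).2)
      else pairs) s
    = (pvG hits).foldl PySem.Set.add s := by
  trans ((PySem.List.pyRange 0 ((hits.length : Int) - 1) 1).map (fun k =>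
      (PySem.List.pyGetD hits k ((0 : Int), ""), PySem.List.pyGetD hits (k + 1) ((0 : Int), "")))).foldl
      (fun pairs q => if q.2.1 == q.1.1 + 1 then PySem.Set.add pairs (q.1.2, q.2.2) else pairs) s
  · rw [List.foldl_map]
  · rw [consec_map_eq hits ((0 : Int), ""),
      PySem.List.foldl_if_eq_foldl_filter
        (p := fun q : (Int × String) × (Int × String) => q.2.1 == q.1.1 + 1)
        (f := fun pairs (q : (Int × String) × (Int × String)) => PySem.Set.add pairs (q.1.2, q.2.2)),
      ← zip_filter_eq_pvG hits, List.foldl_map]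

-- A's window pass = fold of Set.add over its emitted pair list
theorem winA_fold (P : String → Bool) (ids : List String) (s : PySem.Set (String × String)) :
    (PySem.List.pyRange 0 (ids.length : Int) 1).foldl (fun pairs i =>
      (PySem.List.pyRange (i + 1) (min (i + 5) (ids.length : Int)) 1).foldl (fun pairs j =>
        if P (PySem.List.pyGetD ids i "") && P (PySem.List.pyGetD ids j "") then
          PySem.Set.add pairs (PySem.List.pyGetD ids i "", PySem.List.pyGetD ids j "")
        else pairs) pairs) s
    = (pvEW P ids).foldl PySem.Set.add s := by
  trans ((PySem.List.pyRange 0 (ids.length : Int) 1).flatMap (fun i =>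
      (PySem.List.pyRange (i + 1) (min (i + 5) (ids.length : Int)) 1).map (fun j =>
        (PySem.List.pyGetD ids i "", PySem.List.pyGetD ids j "")))).foldl
      (fun pairs p => if P p.1 && P p.2 then PySem.Set.add pairs p else pairs) s
  · rw [List.foldl_flatMap]
    apply PySem.List.foldl_congr_mem
    intro acc i _
    rw [List.foldl_map]
  · rw [PySem.List.foldl_if_eq_foldl_filter, List.filter_flatMap, winA_eq P ids]

-- ===== VERDICT (by name: the statement is the Claim_ definition above) =====
theorem entity_guided_pairs_py_spec : Claim_equal_entity_guided_pairs_py := by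
  intro eo em _
  unfold Spec_entity_guided_pairs_py entity_guided_pairs_py entity_guided_pairs_py_alt
  apply PySem.List.foldl_congr_mem
  intro s kv _
  by_cases hpl : PySem.Str.isIn "place:" kv.1 = true
  · rw [if_pos hpl, if_pos hpl]
  · rw [if_neg hpl, if_neg hpl]
    dsimp only
    rw [pvHits_eq (fun x => (PySem.Dict.ofList em).contains x) kv.2 0]
    simp only [← pyGetD_fst]
    simp only [show ((kv.2.length : Int)) = ((kv.2.map Prod.fst).length : Int) from by simp]
    rw [consA_fold ((PySem.Dict.ofList em).contains) (kv.2.map Prod.fst) s,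
      consB_fold (pvHits (fun x => (PySem.Dict.ofList em).contains x) 0 (kv.2.map Prod.fst)) s,
      pvG_hits]
    by_cases h5 : ((kv.2.map Prod.fst).length : Int) > 5
    · rw [if_pos h5, if_pos h5]
      rw [winA_fold, winB_eq, pvWL_hits]
    · rw [if_neg h5, if_neg h5]
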